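-- pv_equiv track=rewrite | github.com/aQuetzalcoatlus/myfreeCodeCamp_Challenges | 10_October_2025/25-10-2025/Complementary_DNA.py | complementary_dna
-- ===== SOURCE A (Python) =====
-- def complementary_dna(strand: str) -> str:
--     DNA_letters: set[str] = {"A", "C", "G", "T"}
--     invalid_chars: int = sum(1 for ch in strand if ch not in DNA_letters)
--
--     if invalid_chars:
--         raise ValueError(f"Given strand should only contain characters {DNA_letters}")
--
--     complements_dict: dict = {"A": "T", "T": "A", "C": "G", "G": "C"}
--     complement_strand: str = "".join(complements_dict[char] for char in strand)
--
--     return complement_strand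
-- ===== SOURCE B (Python) =====
-- def complementary_dna(strand: str) -> str:
--     DNA_letters: set[str] = {"A", "C", "G", "T"}
--     if set(strand) - DNA_letters:
--         raise ValueError(f"Given strand should only contain characters {DNA_letters}")
--     return strand.replace("A", "t").replace("T", "a").replace("C", "g").replace("G", "c").upper()
-- ===== Notes on version B (the rewrite author's own statement) =====
-- stated objective: alternative
-- what changed: Validation becomes the emptiness test of a set difference instead of a per-character counting comprehension, and the complement is built by four staged whole-string replace passes with a lowercase case-swap trick plus a final .upper(), instead of a single per-character dict-lookup join.
import Mathlib
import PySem

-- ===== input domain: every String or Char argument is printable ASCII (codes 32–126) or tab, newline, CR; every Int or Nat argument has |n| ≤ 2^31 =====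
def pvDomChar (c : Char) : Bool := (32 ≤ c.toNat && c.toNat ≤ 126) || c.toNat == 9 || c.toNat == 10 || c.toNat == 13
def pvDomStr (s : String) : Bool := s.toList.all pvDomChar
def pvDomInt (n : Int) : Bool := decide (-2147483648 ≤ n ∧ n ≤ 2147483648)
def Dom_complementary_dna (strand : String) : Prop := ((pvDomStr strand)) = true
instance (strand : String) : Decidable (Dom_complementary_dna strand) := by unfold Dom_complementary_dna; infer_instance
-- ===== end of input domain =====

-- B validates via the emptiness of a set difference and builds the complement by four
-- whole-string replacement passes with a case-swap trick plus a final .upper(), instead of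
-- counting invalid characters and joining per-character dict lookups (objective: alternative).
-- Pre_ excludes strands with a character outside {A,C,G,T}, on which A raises ValueError.

-- ===== PORT A =====
-- A: count invalid chars; if any, raise (port returns "" on the excluded raise branch);
-- else join dict lookups per character.
def complementary_dna (strand : String) : String :=
  let dnaLetters : PySem.Set Char := PySem.Set.ofList ['A', 'C', 'G', 'T']
  let invalidChars : Int :=
    strand.toList.foldl (fun acc ch => if ¬ PySem.Set.contains dnaLetters ch then acc + 1 else acc) 0
  if invalidChars ≠ 0 then ""  -- Python raises ValueError here; excluded by Pre_
  else
    let complementsDict : PySem.Dict Char Char := PySem.Dict.ofList [('A', 'T'), ('T', 'A'), ('C', 'G'), ('G', 'C')]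
    String.ofList (strand.toList.map (fun c => (PySem.Dict.get? complementsDict c).getD c))  -- KeyError impossible: all chars valid here

-- ===== PORT B =====
-- B: if set(strand) - DNA_letters is non-empty, raise; else four staged replace passes
-- A->t, T->a, C->g, G->c, then upper().
def complementary_dna_alt (strand : String) : String :=
  let dnaLetters : PySem.Set Char := PySem.Set.ofList ['A', 'C', 'G', 'T']
  if PySem.Set.diff (PySem.Set.ofList strand.toList) dnaLetters ≠ [] then ""  -- Python raises ValueError here; excluded by Pre_
  else
    PySem.Str.upper (PySem.Str.replace (PySem.Str.replace (PySem.Str.replace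
      (PySem.Str.replace strand "A" "t") "T" "a") "C" "g") "G" "c")

-- ===== PRECONDITION & SPEC =====
-- Exactly the inputs on which A returns (no ValueError): every character is one of A,C,G,T.
def Pre_complementary_dna (strand : String) : Prop :=
  (strand.toList.all fun c => c = 'A' || c = 'C' || c = 'G' || c = 'T') = true
instance (strand : String) : Decidable (Pre_complementary_dna strand) := by
  unfold Pre_complementary_dna; infer_instance

def pvWitness_complementary_dna : String := "AT"

def Spec_complementary_dna (strand : String) (out : String) : Prop := out = complementary_dna_alt strand
instance (strand : String) (out : String) : Decidable (Spec_complementary_dna strand out) := by unfold Spec_complementary_dna; infer_instance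

-- ===== CLAIM (what is proved, stated in full; the proofs are below) =====
def Claim_equal_complementary_dna : Prop := ∀ (strand : String), Dom_complementary_dna strand → Pre_complementary_dna strand → Spec_complementary_dna strand (complementary_dna strand)

-- ===== LEMMAS AND PROOFS =====
-- A's invalid-character counter stays at its accumulator when every char is a DNA letter.
theorem pv_count_zero (l : List Char)
    (h : ∀ c ∈ l, c = 'A' ∨ c = 'C' ∨ c = 'G' ∨ c = 'T') (acc : Int) :
    l.foldl (fun acc ch =>
      if ¬ PySem.Set.contains (PySem.Set.ofList ['A', 'C', 'G', 'T']) ch then acc + 1 else acc) acc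
      = acc := by
  induction l generalizing acc with
  | nil => rfl
  | cons c t ih =>
    have hc := h c (List.mem_cons_self ..)
    have ht : ∀ c ∈ t, c = 'A' ∨ c = 'C' ∨ c = 'G' ∨ c = 'T' :=
      fun x hx => h x (List.mem_cons_of_mem _ hx)
    simp only [List.foldl_cons]
    rcases hc with h | h | h | h <;> subst h <;>
      simpa using ih ht acc

-- B's validation: the set difference is empty when every char is a DNA letter.
theorem pv_diff_nil (l : List Char)
    (h : ∀ c ∈ l, c = 'A' ∨ c = 'C' ∨ c = 'G' ∨ c = 'T') :
    PySem.Set.diff (PySem.Set.ofList l) (PySem.Set.ofList ['A', 'C', 'G', 'T']) = [] := by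
  simp only [PySem.Set.diff, List.filter_eq_nil_iff]
  intro x hx
  have hx' : x ∈ l := (PySem.Set.mem_ofList (xs := l) (y := x)).mp hx
  rcases h x hx' with h | h | h | h <;> subst h <;> decide

-- Chars.replace with a single-character pattern is the pointwise substitution (go unrolled).
theorem pv_go_single (a b : Char) : ∀ (l : List Char) (fuel : Nat) (acc : List Char),
    l.length ≤ fuel →
    PySem.Chars.replace.go [a] [b] fuel l acc
      = acc.reverse ++ l.map (fun c => if c = a then b else c) := by
  intro l
  induction l with
  | nil =>
    intro fuel acc _
    cases fuel <;> simp [PySem.Chars.replace.go]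
  | cons c t ih =>
    intro fuel acc h
    cases fuel with
    | zero => simp at h
    | succ n =>
      rw [PySem.Chars.replace.go]
      by_cases hc : c = a
      · subst hc
        simp only [List.isPrefixOf, BEq.rfl, Bool.true_and, if_pos, List.length_cons,
          List.length_nil, Nat.zero_add, List.drop_succ_cons, List.drop_zero]
        rw [ih n _ (Nat.le_of_succ_le_succ h)]
        simp
      · have hpre : List.isPrefixOf [a] (c :: t) = false := by
          simp [List.isPrefixOf]; exact fun h' => absurd h'.symm hc
        rw [hpre]
        simp only [Bool.false_eq_true, if_neg, not_false_iff]
        rw [ih n _ (Nat.le_of_succ_le_succ h)]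
        simp [hc]

theorem pv_replace_single (a b : Char) (l : List Char) :
    PySem.Chars.replace l [a] [b] = l.map (fun c => if c = a then b else c) := by
  rw [PySem.Chars.replace]
  simp [pv_go_single a b l l.length [] (le_refl _)]

-- ===== VERDICT (by name: the statement is the Claim_ definition above) =====
theorem complementary_dna_spec : Claim_equal_complementary_dna := by
  intro strand _ hpre0
  have hpre : ∀ c ∈ strand.toList, c = 'A' ∨ c = 'C' ∨ c = 'G' ∨ c = 'T' := by
    intro c hc
    have := (List.all_eq_true.mp hpre0) c hc
    simp only [Bool.or_eq_true, decide_eq_true_eq] at this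
    tauto
  unfold Spec_complementary_dna complementary_dna complementary_dna_alt
  simp only [pv_count_zero strand.toList hpre 0, pv_diff_nil strand.toList hpre,
    ne_eq, not_true_eq_false, if_false]
  apply String.toList_inj.mp
  simp only [PySem.Str.toList_upper, PySem.Str.toList_replace, PySem.Chars.upper]
  rw [show ("A" : String).toList = ['A'] from rfl, show ("t" : String).toList = ['t'] from rfl,
    show ("T" : String).toList = ['T'] from rfl, show ("a" : String).toList = ['a'] from rfl,
    show ("C" : String).toList = ['C'] from rfl, show ("g" : String).toList = ['g'] from rfl,
    show ("G" : String).toList = ['G'] from rfl, show ("c" : String).toList = ['c'] from rfl]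
  rw [pv_replace_single, pv_replace_single, pv_replace_single, pv_replace_single]
  simp only [List.map_map, String.toList_ofList]
  apply List.map_congr_left
  intro x hx
  rcases hpre x hx with h | h | h | h <;> subst h <;> decide
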